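-- pv_equiv track=rewrite | github.com/Leman-Quinn/fifteen | fifteen_en_final_corrected.py | board_generator
-- ===== SOURCE A (Python) =====
-- def board_generator(total_pieces, num_rows, num_columns):
--     """Generates the playable board(dynamic) and winner board(static)."""
--
--     current_number = 1 #how the numbers are assigned when generating the board
--     board = []
--     win_board = []
--
--     for rows in range(int(num_rows)): #generates the board
--                 rows = []
--
--                 for columns in range(int(num_columns)):
--                     if current_number < total_pieces:
--                         rows.append(current_number)
--                         current_number += 1
--                     else:
--                         rows.append(0)
--
--                 board.append(rows)
--                 win_board.append(list(rows))
--
--     return board, win_board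
-- ===== SOURCE B (Python) =====
-- def board_generator(total_pieces, num_rows, num_columns):
--     """Generates the playable board(dynamic) and winner board(static)."""
--     R = int(num_rows)
--     C = int(num_columns)
--     total = max(0, R) * max(0, C)
--     filled = max(0, min(total, total_pieces - 1))
--     flat = list(range(1, filled + 1)) + [0] * (total - filled)
--     board = [flat[r * C:(r + 1) * C] for r in range(R)]
--     win_board = [row[:] for row in board]
--     return board, win_board
-- ===== Notes on version B (the rewrite author's own statement) =====
-- stated objective: alternative
-- what changed: Replaced the cell-by-cell counter-threaded double loop with a staged pipeline: build the whole numbering as one flat 1-D list (a range of the filled prefix plus a zero pad computed in closed form), then cut it into rows by slicing, and deep-copy the rows for win_board.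
import Mathlib
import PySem

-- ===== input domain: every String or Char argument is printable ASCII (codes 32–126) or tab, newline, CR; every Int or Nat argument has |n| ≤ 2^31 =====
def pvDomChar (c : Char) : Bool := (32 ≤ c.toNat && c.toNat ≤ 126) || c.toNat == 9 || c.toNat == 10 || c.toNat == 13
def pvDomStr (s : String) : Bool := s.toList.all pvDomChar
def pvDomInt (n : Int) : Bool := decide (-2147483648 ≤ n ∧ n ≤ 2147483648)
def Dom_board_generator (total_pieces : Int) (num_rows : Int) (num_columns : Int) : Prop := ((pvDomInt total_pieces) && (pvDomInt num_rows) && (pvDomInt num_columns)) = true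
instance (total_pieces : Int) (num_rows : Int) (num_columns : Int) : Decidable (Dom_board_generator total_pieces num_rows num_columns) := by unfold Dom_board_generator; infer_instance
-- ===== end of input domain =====

-- B replaces A's counter-threaded double loop with a staged pipeline: the numbering is
-- built once as a flat 1-D list (range prefix + zero pad, sizes in closed form) and then
-- cut into rows by slicing; win_board is a deep copy of those rows. Objective: alternative.


-- ===== PORT A =====
-- inner loop body: 'if current_number < total_pieces: rows.append(current_number); current_number += 1 else: rows.append(0)'
def bgInnerStep (total_pieces : Int) (p : Int × List Int) (_ : Int) : Int × List Int :=
  if p.1 < total_pieces then (p.1 + 1, p.2 ++ [p.1]) else (p.1, p.2 ++ [0])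

-- outer loop body: build one row, append it to board and a copy to win_board
def bgOuterStep (total_pieces : Int) (num_columns : Int)
    (st : Int × List (List Int) × List (List Int)) (_ : Int) :
    Int × List (List Int) × List (List Int) :=
  let inner := (PySem.List.pyRange 0 num_columns 1).foldl (bgInnerStep total_pieces) (st.1, [])
  (inner.1, st.2.1 ++ [inner.2], st.2.2 ++ [inner.2])

def board_generator (total_pieces : Int) (num_rows : Int) (num_columns : Int) :
    List (List Int) × List (List Int) :=
  let fin := (PySem.List.pyRange 0 num_rows 1).foldl (bgOuterStep total_pieces num_columns) (1, [], [])
  (fin.2.1, fin.2.2)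

-- ===== PORT B =====
-- 'flat = list(range(1, filled + 1)) + [0] * (total - filled)' with filled = max(0, min(total, total_pieces - 1))
def bgFilled (total_pieces : Int) (total : Int) : Int := max 0 (min total (total_pieces - 1))
def bgFlat (total_pieces : Int) (total : Int) : List Int :=
  PySem.List.pyRange 1 (bgFilled total_pieces total + 1) 1
    ++ List.replicate (total - bgFilled total_pieces total).toNat (0 : Int)

def board_generator_alt (total_pieces : Int) (num_rows : Int) (num_columns : Int) :
    List (List Int) × List (List Int) :=
  let total := max 0 num_rows * max 0 num_columns
  let flat := bgFlat total_pieces total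
  -- board = [flat[r*C:(r+1)*C] for r in range(R)]
  let board := (PySem.List.pyRange 0 num_rows 1).map
    (fun r => PySem.List.slice flat (some (r * num_columns)) (some ((r + 1) * num_columns)))
  -- win_board = [row[:] for row in board]
  let win_board := board.map (fun row => PySem.List.slice row none none)
  (board, win_board)

-- ===== PRECONDITION & SPEC =====
def Spec_board_generator (total_pieces : Int) (num_rows : Int) (num_columns : Int) (out : List (List Int) × List (List Int)) : Prop := out = board_generator_alt total_pieces num_rows num_columns
instance (total_pieces : Int) (num_rows : Int) (num_columns : Int) (out : List (List Int) × List (List Int)) : Decidable (Spec_board_generator total_pieces num_rows num_columns out) := by unfold Spec_board_generator; infer_instance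

-- ===== CLAIM (what is proved, stated in full; the proofs are below) =====
def Claim_equal_board_generator : Prop := ∀ (total_pieces : Int) (num_rows : Int) (num_columns : Int), Dom_board_generator total_pieces num_rows num_columns → Spec_board_generator total_pieces num_rows num_columns (board_generator total_pieces num_rows num_columns)

-- ===== LEMMAS AND PROOFS =====

-- value of the cell at 0-based linear position k
def bgVal (tp k : Int) : Int := if k + 1 < tp then k + 1 else 0

-- the row that both programs produce at row index r (A via the counter, B via slicing)
def bgRow (total_pieces : Int) (num_columns : Int) (r : Int) : List Int :=
  (PySem.List.pyRange 0 num_columns 1).map (fun c => bgVal total_pieces (r * num_columns + c))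

-- A's counter after k cells have been produced
def bgCnt (tp k : Int) : Int := if tp ≤ 1 then 1 else min (k + 1) tp

lemma bgStep_eq (tp k : Int) (hk : 0 ≤ k) (row : List Int) (x : Int) :
    bgInnerStep tp (bgCnt tp k, row) x = (bgCnt tp (k + 1), row ++ [bgVal tp k]) := by
  unfold bgInnerStep bgCnt bgVal
  split_ifs <;> simp_all <;> omega

lemma bgInner_eq (tp : Int) (l : List Int) : ∀ (k : Int), 0 ≤ k → ∀ (row : List Int),
    l.foldl (bgInnerStep tp) (bgCnt tp k, row)
      = (bgCnt tp (k + l.length), row ++ (List.range l.length).map (fun j : Nat => bgVal tp (k + (j : Int)))) := by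
  induction l with
  | nil => intro k hk row; simp
  | cons x xs ih =>
    intro k hk row
    rw [List.foldl_cons, bgStep_eq tp k hk row x, ih (k + 1) (by omega)]
    refine Prod.ext ?_ ?_
    · show bgCnt tp (k + 1 + xs.length) = bgCnt tp (k + (xs.length + 1 : Nat))
      congr 1; push_cast; ring
    · show (row ++ [bgVal tp k]) ++ (List.range xs.length).map (fun j : Nat => bgVal tp (k + 1 + (j : Int)))
        = row ++ (List.range (xs.length + 1)).map (fun j : Nat => bgVal tp (k + (j : Int)))
      rw [List.range_succ_eq_map, List.append_assoc]
      simp only [List.map_cons, List.map_map, List.singleton_append, Nat.cast_zero, add_zero]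
      congr 1
      congr 1
      apply List.map_congr_left
      intro j _
      simp only [Function.comp_apply]
      congr 1; push_cast; ring

lemma bgRowA_eq (tp nc r : Int) :
    (List.range (PySem.List.pyRange 0 nc 1).length).map
        (fun j : Nat => bgVal tp (r * ((PySem.List.pyRange 0 nc 1).length : Int) + (j : Int)))
      = bgRow tp nc r := by
  by_cases hnc : nc ≤ 0
  · rw [PySem.List.pyRange_one_eq_nil (by omega)]; simp [bgRow, PySem.List.pyRange_one_eq_nil (by omega : nc ≤ 0)]
  · have hlen : (PySem.List.pyRange 0 nc 1).length = nc.toNat := by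
      rw [PySem.List.length_pyRange_one]; omega
    have hcast : ((nc.toNat : Int)) = nc := by omega
    rw [hlen, bgRow, PySem.List.pyRange_one]
    simp only [Int.sub_zero, List.map_map]
    apply List.map_congr_left
    intro j _
    simp only [Function.comp_apply, hcast, zero_add]

lemma bgOuter_eq (tp nr nc : Int) : ∀ (n : Nat) (r : Int), 0 ≤ r → (nr - r).toNat = n →
    ∀ (b w : List (List Int)), ∃ c',
    (PySem.List.pyRange r nr 1).foldl (bgOuterStep tp nc)
        (bgCnt tp (r * ((PySem.List.pyRange 0 nc 1).length : Int)), b, w)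
      = (c', b ++ (PySem.List.pyRange r nr 1).map (bgRow tp nc),
             w ++ (PySem.List.pyRange r nr 1).map (bgRow tp nc)) := by
  intro n
  induction n with
  | zero =>
    intro r hr hn b w
    have hnr : nr ≤ r := by omega
    rw [PySem.List.pyRange_one_eq_nil hnr]
    exact ⟨bgCnt tp (r * ((PySem.List.pyRange 0 nc 1).length : Int)), by simp⟩
  | succ n ih =>
    intro r hr hn b w
    have hrb : r < nr := by omega
    set C : Int := ((PySem.List.pyRange 0 nc 1).length : Int) with hC
    have hC0 : 0 ≤ C := by positivity
    rw [PySem.List.pyRange_one_cons hrb, List.foldl_cons]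
    have hstep : bgOuterStep tp nc (bgCnt tp (r * C), b, w) r
        = (bgCnt tp ((r + 1) * C), b ++ [bgRow tp nc r], w ++ [bgRow tp nc r]) := by
      unfold bgOuterStep
      rw [bgInner_eq tp _ (r * C) (by positivity) []]
      simp only [List.nil_append]
      rw [bgRowA_eq tp nc r]
      have : r * C + ((PySem.List.pyRange 0 nc 1).length : Int) = (r + 1) * C := by
        rw [← hC]; ring
      rw [this]
    rw [hstep]
    obtain ⟨c', hrec⟩ := ih (r + 1) (by omega) (by omega) (b ++ [bgRow tp nc r]) (w ++ [bgRow tp nc r])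
    refine ⟨c', ?_⟩
    rw [hrec]
    simp [List.append_assoc]

-- A's result is the row map
lemma bgA_eq (tp nr nc : Int) :
    board_generator tp nr nc
      = ((PySem.List.pyRange 0 nr 1).map (bgRow tp nc),
         (PySem.List.pyRange 0 nr 1).map (bgRow tp nc)) := by
  have h1 : (1 : Int) = bgCnt tp (0 * ((PySem.List.pyRange 0 nc 1).length : Int)) := by
    unfold bgCnt; split_ifs <;> omega
  obtain ⟨c', h⟩ := bgOuter_eq tp nr nc (nr - 0).toNat 0 le_rfl rfl [] []
  rw [← h1] at h
  unfold board_generator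
  rw [h]
  simp

-- B-side: the flat list is the values map over linear positions (when total ≥ 0)
lemma bgFlat_eq (tp total : Int) (h : 0 ≤ total) :
    bgFlat tp total = (PySem.List.pyRange 0 total 1).map (bgVal tp) := by
  unfold bgFlat
  set filled : Int := bgFilled tp total with hf
  have hfd : filled = max 0 (min total (tp - 1)) := rfl
  have hf0 : 0 ≤ filled := by omega
  have hft : filled ≤ total := by omega
  rw [PySem.List.pyRange_one_append 0 filled total hf0 hft, List.map_append]
  congr 1
  · rw [PySem.List.pyRange_one 1 (filled + 1), PySem.List.pyRange_one 0 filled]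
    have : (filled + 1 - 1).toNat = (filled - 0).toNat := by omega
    rw [this, List.map_map]
    apply List.map_congr_left
    intro j hj
    have hjf : (j : Int) < filled := by
      rw [List.mem_range] at hj; omega
    simp only [Function.comp_apply, zero_add, bgVal]
    have : (j : Int) + 1 < tp := by omega
    rw [if_pos this]; ring
  · have hlen : (PySem.List.pyRange filled total 1).length = (total - filled).toNat :=
      PySem.List.length_pyRange_one _ _
    symm
    rw [List.eq_replicate_iff]
    constructor
    · rw [List.length_map, hlen]
    · intro x hx
      rw [List.mem_map] at hx
      obtain ⟨y, hy, hxy⟩ := hx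
      rw [PySem.List.mem_pyRange_one] at hy
      rw [← hxy]
      unfold bgVal
      rw [if_neg (by omega)]

-- B's slice at row r equals the common row
lemma bgSlice_eq (tp nr nc r : Int) (h0 : 0 ≤ r) (h1 : r < nr) :
    PySem.List.slice (bgFlat tp (max 0 nr * max 0 nc)) (some (r * nc)) (some ((r + 1) * nc))
      = bgRow tp nc r := by
  have hmr : max 0 nr = nr := by omega
  rw [hmr]
  by_cases hnc : nc ≤ 0
  · have hmc : max 0 nc = 0 := by omega
    have hflat : bgFlat tp (nr * max 0 nc) = [] := by
      unfold bgFlat bgFilled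
      have : max 0 (min (nr * max 0 nc) (tp - 1)) = 0 := by
        have : nr * max 0 nc = 0 := by rw [hmc, mul_zero]
        omega
      rw [this, PySem.List.pyRange_one_eq_nil (a := 1) (b := 0 + 1) (by omega)]
      have : (nr * max 0 nc - 0).toNat = 0 := by
        have : nr * max 0 nc = 0 := by rw [hmc, mul_zero]
        omega
      rw [this]
      simp
    rw [hflat, bgRow, PySem.List.pyRange_one_eq_nil hnc]
    simp [PySem.List.slice]
  · have hnc : 0 < nc := by omega
    have hmc : max 0 nc = nc := by omega
    rw [hmc]
    have htot0 : 0 ≤ nr * nc := mul_nonneg (by omega) (by omega)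
    have ha : 0 ≤ r * nc := mul_nonneg h0 (by omega)
    have hb : 0 ≤ (r + 1) * nc := mul_nonneg (by omega) (by omega)
    have hsplit : r * nc + nc = (r + 1) * nc := by ring
    have hub : (r + 1) * nc ≤ nr * nc := by
      apply mul_le_mul_of_nonneg_right (by omega) (by omega)
    rw [bgFlat_eq tp (nr * nc) htot0]
    rw [PySem.List.slice_toNat (ha := ha) (hb := hb)]
    rw [PySem.List.pyRange_one_append 0 (r * nc) (nr * nc) ha (le_trans (by omega) hub)]
    rw [List.map_append]
    have hdrop1 : ((PySem.List.pyRange 0 (r * nc) 1).map (bgVal tp)).length = (r * nc).toNat := by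
      rw [List.length_map, PySem.List.length_pyRange_one]; omega
    rw [List.drop_left' hdrop1]
    rw [PySem.List.pyRange_one_append (r * nc) ((r + 1) * nc) (nr * nc) (by omega) hub]
    rw [List.map_append]
    have htk : (((r + 1) * nc).toNat - (r * nc).toNat)
        = ((PySem.List.pyRange (r * nc) ((r + 1) * nc) 1).map (bgVal tp)).length := by
      rw [List.length_map, PySem.List.length_pyRange_one]; omega
    rw [htk, List.take_left]
    rw [bgRow, PySem.List.pyRange_one (r * nc) ((r + 1) * nc), PySem.List.pyRange_one 0 nc]
    have hn : ((r + 1) * nc - r * nc).toNat = (nc - 0).toNat := by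
      have : (r + 1) * nc - r * nc = nc := by ring
      rw [this]; omega
    rw [hn, List.map_map, List.map_map]
    apply List.map_congr_left
    intro j _
    simp only [Function.comp_apply, zero_add]

-- ===== VERDICT (by name: the statement is the Claim_ definition above) =====
theorem board_generator_spec : Claim_equal_board_generator := by
  intro tp nr nc _
  show board_generator tp nr nc = board_generator_alt tp nr nc
  rw [bgA_eq]
  unfold board_generator_alt
  have hboard : (PySem.List.pyRange 0 nr 1).map
      (fun r => PySem.List.slice (bgFlat tp (max 0 nr * max 0 nc)) (some (r * nc)) (some ((r + 1) * nc)))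
      = (PySem.List.pyRange 0 nr 1).map (bgRow tp nc) := by
    apply List.map_congr_left
    intro r hr
    rw [PySem.List.mem_pyRange_one] at hr
    exact bgSlice_eq tp nr nc r hr.1 hr.2
  simp only [hboard, PySem.List.slice_none_none, List.map_id']
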